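-- pv_equiv track=rewrite | github.com/Kishikawa1286/zasshikai202405 | src/utils/latex_to_markdown.py | delete_line_breaks_inside_math_env
-- ===== SOURCE A (Python) =====
-- def delete_line_breaks_inside_math_env(latex: str) -> str:
--     result = []
--     in_math_env = False
--     start_idx = 0
--
--     for idx, char in enumerate(latex):
--         if char == '$':
--             in_math_env = not in_math_env
--
--         # If within math environment and encounter "\n", replace it
--         if in_math_env and char == '\n':
--             # Append text up to the line break
--             result.append(latex[start_idx:idx])
--             start_idx = idx + 1  # Skip the line break
--
--     # Append the remaining text
--     result.append(latex[start_idx:])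
--     return ''.join(result)
-- ===== SOURCE B (Python) =====
-- def delete_line_breaks_inside_math_env(latex: str) -> str:
--     parts = latex.split('$')
--     return '$'.join(p.replace('\n', '') if i % 2 == 1 else p
--                     for i, p in enumerate(parts))
-- ===== Notes on version B (the rewrite author's own statement) =====
-- stated objective: faster
-- what changed: Replaces the character-by-character math-mode state toggle with slice bookkeeping by splitting on the dollar delimiter, stripping newlines from the odd-index (inside-math) segments, and joining back.
import Mathlib
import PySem

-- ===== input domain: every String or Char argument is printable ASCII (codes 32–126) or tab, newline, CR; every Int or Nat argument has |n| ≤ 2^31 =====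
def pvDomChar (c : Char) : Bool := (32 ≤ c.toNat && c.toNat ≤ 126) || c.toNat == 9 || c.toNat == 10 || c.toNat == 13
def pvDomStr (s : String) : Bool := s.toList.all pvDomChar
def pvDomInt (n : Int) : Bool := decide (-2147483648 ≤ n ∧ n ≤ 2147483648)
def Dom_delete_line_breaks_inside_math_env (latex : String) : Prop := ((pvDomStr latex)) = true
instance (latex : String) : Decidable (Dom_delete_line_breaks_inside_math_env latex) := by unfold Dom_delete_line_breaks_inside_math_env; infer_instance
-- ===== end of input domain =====

-- B replaces A's character-by-character math-mode toggle with split('$') / strip newlines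
-- from odd-index segments / '$'.join — same result, more idiomatic decomposition.

-- ===== PORT A =====
def delete_line_breaks_inside_math_env (latex : String) : String :=
  let cs := latex.toList
  let fin := (PySem.List.enumerate cs 0).foldl
    (fun (st : List (List Char) × Bool × Int) (p : Int × Char) =>
      let in_math := if p.2 = '$' then !st.2.1 else st.2.1
      if in_math ∧ p.2 = '\n' then
        (st.1 ++ [PySem.List.slice cs (some st.2.2) (some p.1)], in_math, p.1 + 1)
      else (st.1, in_math, st.2.2))
    ([], false, 0)
  String.mk (PySem.Chars.join [] (fin.1 ++ [PySem.List.slice cs (some fin.2.2) none]))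

-- ===== PORT B =====
def delete_line_breaks_inside_math_env_alt (latex : String) : String :=
  let parts := PySem.Chars.splitOn latex.toList ['$']
  String.mk (PySem.Chars.join ['$']
    ((PySem.List.enumerate parts 0).map
      (fun p => if PySem.Int.mod p.1 2 = 1 then PySem.Chars.replace p.2 ['\n'] [] else p.2)))

-- ===== PRECONDITION & SPEC =====
def Spec_delete_line_breaks_inside_math_env (latex : String) (out : String) : Prop := out = delete_line_breaks_inside_math_env_alt latex
instance (latex : String) (out : String) : Decidable (Spec_delete_line_breaks_inside_math_env latex out) := by unfold Spec_delete_line_breaks_inside_math_env; infer_instance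

-- ===== CLAIM (what is proved, stated in full; the proofs are below) =====
def Claim_equal_delete_line_breaks_inside_math_env : Prop := ∀ (latex : String), Dom_delete_line_breaks_inside_math_env latex → Spec_delete_line_breaks_inside_math_env latex (delete_line_breaks_inside_math_env latex)

-- ===== LEMMAS AND PROOFS =====

-- canonical one-pass form both ports are reduced to
def pvF : Bool → List Char → List Char
  | _, [] => []
  | b, c :: cs =>
    let b' := if c = '$' then !b else b
    if b' ∧ c = '\n' then pvF b' cs else c :: pvF b' cs

-- B's transform on the split parts, with the parity carried as a Bool
def pvT : Bool → List (List Char) → List Char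
  | _, [] => []
  | b, [x] => if b then x.filter (fun c => !(c == '\n')) else x
  | b, x :: y :: t => (if b then x.filter (fun c => !(c == '\n')) else x) ++ '$' :: pvT (!b) (y :: t)

lemma pvJoin_nil (l : List (List Char)) : PySem.Chars.join [] l = l.flatten := by
  induction l with
  | nil => simp [PySem.Chars.join, List.intercalate]
  | cons x xs ih =>
    cases xs with
    | nil => simp [PySem.Chars.join, List.intercalate]
    | cons y t =>
      simp only [PySem.Chars.join, List.intercalate, List.intersperse] at *
      simp_all

lemma pvJoin_cons_cons (s x y : List Char) (t : List (List Char)) :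
    PySem.Chars.join s (x :: y :: t) = x ++ s ++ PySem.Chars.join s (y :: t) := by
  simp [PySem.Chars.join, List.intercalate, List.intersperse]

lemma pvReplace_go (fuel : Nat) : ∀ (l acc : List Char), l.length ≤ fuel →
    PySem.Chars.replace.go ['\n'] [] fuel l acc = acc.reverse ++ l.filter (fun c => !(c == '\n')) := by
  induction fuel with
  | zero =>
    intro l acc h
    have : l = [] := List.length_eq_zero_iff.mp (Nat.le_zero.mp h)
    subst this; simp [PySem.Chars.replace.go]
  | succ n ih =>
    intro l acc h
    cases l with
    | nil => simp [PySem.Chars.replace.go]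
    | cons c t =>
      by_cases hc : c = '\n'
      · subst hc
        have hstep : PySem.Chars.replace.go ['\n'] [] (n+1) ('\n'::t) acc =
            PySem.Chars.replace.go ['\n'] [] n t acc := by
          have hp : List.isPrefixOf ['\n'] ('\n'::t) = true := by simp [List.isPrefixOf]
          simp [PySem.Chars.replace.go, hp]
        rw [hstep, ih t acc (by simpa using h)]
        simp
      · have hstep : PySem.Chars.replace.go ['\n'] [] (n+1) (c::t) acc =
            PySem.Chars.replace.go ['\n'] [] n t (c :: acc) := by
          have hp : List.isPrefixOf ['\n'] (c :: t) = false := by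
            simp [List.isPrefixOf]; exact fun h' => absurd h'.symm hc
          simp [PySem.Chars.replace.go, hp]
        rw [hstep, ih t (c :: acc) (by simpa using h)]
        have hcb : (c == '\n') = false := by simp [hc]
        simp [hcb]

lemma pvReplace_eq (l : List Char) :
    PySem.Chars.replace l ['\n'] [] = l.filter (fun c => !(c == '\n')) := by
  simp [PySem.Chars.replace, pvReplace_go l.length l [] le_rfl]

lemma pvSplit_go (fuel : Nat) : ∀ (l cur : List Char) (acc : List (List Char)), l.length ≤ fuel →
    PySem.Chars.splitOn.go ['$'] fuel l cur acc =
      acc.reverse ++ List.modifyHead (cur.reverse ++ ·) (List.splitOnP (· == '$') l) := by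
  induction fuel with
  | zero =>
    intro l cur acc h
    have : l = [] := List.length_eq_zero_iff.mp (Nat.le_zero.mp h)
    subst this; simp [PySem.Chars.splitOn.go, List.splitOnP_nil]
  | succ n ih =>
    intro l cur acc h
    cases l with
    | nil => simp [PySem.Chars.splitOn.go, List.splitOnP_nil]
    | cons c t =>
      rw [List.splitOnP_cons]
      by_cases hc : c = '$'
      · subst hc
        have hstep : PySem.Chars.splitOn.go ['$'] (n+1) ('$'::t) cur acc =
            PySem.Chars.splitOn.go ['$'] n t [] (cur.reverse :: acc) := by
          have hp : List.isPrefixOf ['$'] ('$'::t) = true := by simp [List.isPrefixOf]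
          simp [PySem.Chars.splitOn.go, hp]
        rw [hstep, ih t [] (cur.reverse :: acc) (by simpa using h)]
        obtain ⟨hd, tl, hht⟩ := List.exists_cons_of_ne_nil (List.splitOnP_ne_nil (· == '$') t)
        simp [hht]
      · have hstep : PySem.Chars.splitOn.go ['$'] (n+1) (c::t) cur acc =
            PySem.Chars.splitOn.go ['$'] n t (c :: cur) acc := by
          have hp : List.isPrefixOf ['$'] (c :: t) = false := by
            simp [List.isPrefixOf]; exact fun h' => absurd h'.symm hc
          simp [PySem.Chars.splitOn.go, hp]
        rw [hstep, ih t (c :: cur) acc (by simpa using h)]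
        have hcb : (c == '$') = false := by simp [hc]
        obtain ⟨hd, tl, hht⟩ := List.exists_cons_of_ne_nil (List.splitOnP_ne_nil (· == '$') t)
        simp [hht, hcb]

lemma pvSplit_eq (cs : List Char) :
    PySem.Chars.splitOn cs ['$'] = List.splitOnP (· == '$') cs := by
  rw [PySem.Chars.splitOn, pvSplit_go (cs.length + 1) cs [] [] (by omega)]
  obtain ⟨hd, tl, hht⟩ := List.exists_cons_of_ne_nil (List.splitOnP_ne_nil (· == '$') cs)
  simp [hht]

lemma pvMod2_flip (i : Int) :
    decide (PySem.Int.mod (i + 1) 2 = 1) = !decide (PySem.Int.mod i 2 = 1) := by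
  rw [PySem.Int.mod_eq_emod_of_pos (a := i) (by norm_num), PySem.Int.mod_eq_emod_of_pos (a := i+1) (by norm_num)]
  have h1 := Int.emod_nonneg i (by norm_num : (2:Int) ≠ 0)
  have h2 := Int.emod_lt_of_pos i (by norm_num : (0:Int) < 2)
  have h3 : (i + 1) % 2 = (i % 2 + 1) % 2 := by omega
  rcases (by omega : i % 2 = 0 ∨ i % 2 = 1) with h | h <;> simp [h3, h]

-- B's map-over-enumerate with '$'.join is pvT with the parity of the start index
lemma pvB_join (parts : List (List Char)) : ∀ (i : Int),
    PySem.Chars.join ['$'] ((PySem.List.enumerate parts i).map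
      (fun p => if PySem.Int.mod p.1 2 = 1 then PySem.Chars.replace p.2 ['\n'] [] else p.2)) =
    pvT (decide (PySem.Int.mod i 2 = 1)) parts := by
  induction parts with
  | nil => intro i; simp [PySem.List.enumerate, pvT, PySem.Chars.join, List.intercalate]
  | cons x xs ih =>
    intro i
    cases xs with
    | nil =>
      rw [PySem.List.enumerate_cons]
      by_cases hb : PySem.Int.mod i 2 = 1 <;>
        simp [PySem.List.enumerate, pvT, PySem.Chars.join, List.intercalate, pvReplace_eq]
    | cons y t =>
      have ihh := ih (i + 1)
      simp only [PySem.List.enumerate_cons, List.map_cons] at ihh ⊢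
      rw [pvJoin_cons_cons, ihh, pvMod2_flip]
      by_cases hb : PySem.Int.mod i 2 = 1 <;> simp [pvT, pvReplace_eq]

-- pvT over the split parts is the one-pass pvF
lemma pvT_splitOnP (cs : List Char) : ∀ (b : Bool),
    pvT b (List.splitOnP (· == '$') cs) = pvF b cs := by
  induction cs with
  | nil => intro b; cases b <;> simp [List.splitOnP_nil, pvT, pvF]
  | cons c t ih =>
    intro b
    rw [List.splitOnP_cons]
    obtain ⟨hd, tl, hht⟩ := List.exists_cons_of_ne_nil (List.splitOnP_ne_nil (· == '$') t)
    by_cases hc : c = '$'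
    · subst hc
      have hf : pvF b ('$' :: t) = '$' :: pvF (!b) t := by
        cases b <;> simp [pvF]
      rw [hf, ← ih (!b), hht]
      simp [pvT]
    · have hcb : (c == '$') = false := by simp [hc]
      have hbne : (if c = '$' then !b else b) = b := by simp [hc]
      rw [hcb, if_neg (by simp), hht]
      simp only [List.modifyHead]
      by_cases hn : b = true ∧ c = '\n'
      · obtain ⟨hb, hcn⟩ := hn
        subst hb hcn
        have hf : pvF true ('\n' :: t) = pvF true t := by simp [pvF, hc]
        rw [hf, ← ih true, hht]
        cases tl <;> simp [pvT]
      · have hf : pvF b (c :: t) = c :: pvF b t := by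
          simp only [pvF, hbne]
          rw [if_neg (by simpa using hn)]
        rw [hf, ← ih b, hht]
        cases b with
        | false => cases tl <;> simp [pvT]
        | true =>
          have hcn : ¬ c = '\n' := fun h => hn ⟨rfl, h⟩
          have hcnb : (c == '\n') = false := by simp [hcn]
          cases tl <;> simp [pvT, hcnb]

-- the body of A's for-loop and its output assembly, named so the invariant lemma can speak about them
def pvStepA (cs : List Char) (st : List (List Char) × Bool × Int) (p : Int × Char) :
    List (List Char) × Bool × Int :=
  let in_math := if p.2 = '$' then !st.2.1 else st.2.1
  if in_math ∧ p.2 = '\n' then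
    (st.1 ++ [PySem.List.slice cs (some st.2.2) (some p.1)], in_math, p.1 + 1)
  else (st.1, in_math, st.2.2)

def pvOutA (cs : List Char) (st : List (List Char) × Bool × Int) : List Char :=
  PySem.Chars.join [] (st.1 ++ [PySem.List.slice cs (some st.2.2) none])

-- A's loop invariant: joined pieces ++ pending slice ++ canonical pass on the rest
lemma pvA_fold (cs : List Char) : ∀ (rest : List Char) (j : Nat), cs.drop j = rest →
    ∀ (res : List (List Char)) (b : Bool) (st : Nat), st ≤ j →
    pvOutA cs ((PySem.List.enumerate rest (j : Int)).foldl (pvStepA cs) (res, b, (st : Int))) =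
    PySem.Chars.join [] res ++ (cs.drop st).take (j - st) ++ pvF b rest := by
  intro rest
  induction rest with
  | nil =>
    intro j hdrop res b st hst
    have hlen : cs.length ≤ j := by
      have := congrArg List.length hdrop; simp at this; omega
    simp only [PySem.List.enumerate, List.foldl_nil, pvF, pvOutA]
    rw [PySem.List.slice_from_natCast, pvJoin_nil, pvJoin_nil]
    have : (cs.drop st).take (j - st) = cs.drop st := by
      apply List.take_of_length_le; simp; omega
    simp [this]
  | cons c rest' ih =>
    intro j hdrop res b st hst
    have hj : j < cs.length := by
      by_contra h
      rw [List.drop_eq_nil_of_le (by omega)] at hdrop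
      exact (by simp at hdrop)
    have hcd := List.getElem_cons_drop hj
    rw [hdrop] at hcd
    have hc : cs[j] = c := ((List.cons.injEq _ _ _ _).mp hcd.symm).1.symm
    have hrest' : cs.drop (j + 1) = rest' := ((List.cons.injEq _ _ _ _).mp hcd.symm).2.symm
    rw [PySem.List.enumerate_cons, List.foldl_cons]
    by_cases hcond : (if c = '$' then !b else b) = true ∧ c = '\n'
    · have hstep : pvStepA cs (res, b, (st : Int)) ((j : Int), c) =
          (res ++ [PySem.List.slice cs (some (st : Int)) (some (j : Int))],
           (if c = '$' then !b else b), (j : Int) + 1) := by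
        simp only [pvStepA]
        rw [if_pos (by simpa using hcond)]
      rw [hstep, show ((j : Int) + 1) = ((j + 1 : Nat) : Int) by push_cast; ring,
        ih (j + 1) hrest' _ _ (j + 1) le_rfl]
      rw [pvJoin_nil, pvJoin_nil, PySem.List.slice_natCast]
      have hf : pvF b (c :: rest') = pvF (if c = '$' then !b else b) rest' := by
        simp only [pvF]
        rw [if_pos (by simpa using hcond)]
      rw [hf]
      simp
    · have hstep : pvStepA cs (res, b, (st : Int)) ((j : Int), c) =
          (res, (if c = '$' then !b else b), (st : Int)) := by
        simp only [pvStepA]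
        rw [if_neg (by simpa using hcond)]
      rw [hstep, show ((j : Int) + 1) = ((j + 1 : Nat) : Int) by push_cast; ring,
        ih (j + 1) hrest' res _ st (by omega)]
      have hf : pvF b (c :: rest') = c :: pvF (if c = '$' then !b else b) rest' := by
        simp only [pvF]
        rw [if_neg (by simpa using hcond)]
      rw [hf]
      have hlt : j - st < (cs.drop st).length := by simp; omega
      have hget : (cs.drop st)[j - st] = c := by
        rw [List.getElem_drop]
        rw [← hc]; congr 1; omega
      have htake : (cs.drop st).take (j + 1 - st) = (cs.drop st).take (j - st) ++ [c] := by
        rw [show j + 1 - st = (j - st) + 1 by omega, List.take_succ,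
          List.getElem?_eq_getElem hlt, hget]
        simp
      rw [htake]
      simp

lemma pvMain (latex : String) :
    delete_line_breaks_inside_math_env latex = delete_line_breaks_inside_math_env_alt latex := by
  unfold delete_line_breaks_inside_math_env delete_line_breaks_inside_math_env_alt
  simp only []
  rw [pvB_join, pvSplit_eq, pvT_splitOnP]
  have hstepEq : (fun (st : List (List Char) × Bool × Int) (p : Int × Char) =>
      let in_math := if p.2 = '$' then !st.2.1 else st.2.1
      if in_math ∧ p.2 = '\n' then
        (st.1 ++ [PySem.List.slice latex.toList (some st.2.2) (some p.1)], in_math, p.1 + 1)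
      else (st.1, in_math, st.2.2)) = pvStepA latex.toList := by
    funext st p; simp [pvStepA]
  rw [hstepEq]
  have hA := pvA_fold latex.toList latex.toList 0 (by simp) [] false 0 le_rfl
  simp only [pvOutA, Nat.cast_zero, Nat.sub_zero, List.drop_zero, List.take_zero] at hA
  rw [hA]
  have hmod : decide (PySem.Int.mod 0 2 = 1) = false := by decide
  rw [hmod]
  simp

-- ===== VERDICT (by name: the statement is the Claim_ definition above) =====
theorem delete_line_breaks_inside_math_env_spec : Claim_equal_delete_line_breaks_inside_math_env := by
  intro latex _
  unfold Spec_delete_line_breaks_inside_math_env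
  exact pvMain latex
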